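-- pv_equiv track=rewrite | github.com/memecoder12345678/Zerionyx | IDE/src/md_renderer.py | list_item
-- ===== SOURCE A (Python) =====
-- def list_item(text, checked=None):
--     text_list = text.split("\n")
--     parts = []
--     for line in text_list:
--         if "<code>" in line:
--             line = line.replace("<code>", "<inline_code>").replace(
--                 "</code>", "</inline_code>"
--             )
--         parts.append(line)
--
--     if checked is not None:
--         checkbox = f'<input type="checkbox" disabled{" checked" if checked else ""}>'
--         return f'<li class="task-list-item">{checkbox} {"<br>".join(parts)}</li>'
--     return f'<li>{"<br>".join(parts)}</li>'
-- ===== SOURCE B (Python) =====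
-- def list_item(text, checked=None):
--     # Single left-to-right scan: emit each tag replacement (or <br> for newlines)
--     # as it is encountered; no split into lines, no intermediate list of lines.
--     out = []
--     i = 0
--     n = len(text)
--     while i < n:
--         if text.startswith("</code>", i):
--             out.append("</inline_code>")
--             i += 7
--         elif text.startswith("<code>", i):
--             out.append("<inline_code>")
--             i += 6
--         elif text[i] == "\n":
--             out.append("<br>")
--             i += 1
--         else:
--             out.append(text[i])
--             i += 1
--     body = "".join(out)
--     if checked is None:
--         return "<li>" + body + "</li>"
--     flag = " checked" if checked else ""
--     return ('<li class="task-list-item"><input type="checkbox" disabled'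
--             + flag + "> " + body + "</li>")
-- ===== Notes on version B (the rewrite author's own statement) =====
-- stated objective: alternative
-- what changed: The split-into-lines / per-line-conditional-replace / append-to-list / join pipeline is replaced by a single left-to-right scan over the text that emits '</inline_code>', '<inline_code>' or '<br>' in place of each occurrence of '</code>', '<code>' or a newline, with no line list and no join.
-- intended difference: On inputs where some line contains '</code>' but no '<code>', A leaves that closing tag unconverted (emitting mismatched '</code>' next to '<inline_code>'), while B converts it to '</inline_code>', which is the intended rendering. — e.g. on list_item("</code>", none): A returns "<li></code></li>", B returns "<li></inline_code></li>"
import Mathlib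
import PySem

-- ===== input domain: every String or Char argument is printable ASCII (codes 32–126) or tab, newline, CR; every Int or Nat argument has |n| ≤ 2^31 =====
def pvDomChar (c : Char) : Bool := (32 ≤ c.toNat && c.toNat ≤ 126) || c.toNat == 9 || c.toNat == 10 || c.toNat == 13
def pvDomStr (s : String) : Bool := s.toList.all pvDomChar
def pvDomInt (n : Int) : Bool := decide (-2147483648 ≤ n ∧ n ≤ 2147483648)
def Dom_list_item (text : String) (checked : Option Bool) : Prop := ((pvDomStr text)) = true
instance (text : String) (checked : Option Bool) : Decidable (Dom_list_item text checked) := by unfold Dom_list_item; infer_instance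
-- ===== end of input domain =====

-- B replaces A's split-into-lines / per-line conditional replace / join pipeline by one
-- left-to-right scan of the text that emits each replacement in place (no line list, no
-- per-line loop); intended difference on lines holding '</code>' without '<code>' is
-- stated in D_list_item below.

-- ===== PORT A =====
def list_item (text : String) (checked : Option Bool) : String :=
  let text_list := PySem.Chars.splitOn text.toList "\n".toList
  let parts := text_list.foldl (fun parts line =>
    parts ++ [if PySem.Chars.isIn "<code>".toList line = true then
        PySem.Chars.replace (PySem.Chars.replace line "<code>".toList "<inline_code>".toList)
          "</code>".toList "</inline_code>".toList
      else line]) []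
  match checked with
  | some b =>
    let checkbox := "<input type=\"checkbox\" disabled".toList
      ++ (if b then " checked".toList else []) ++ ">".toList
    String.ofList ("<li class=\"task-list-item\">".toList ++ checkbox ++ " ".toList
      ++ PySem.Chars.join "<br>".toList parts ++ "</li>".toList)
  | none => String.ofList ("<li>".toList ++ PySem.Chars.join "<br>".toList parts ++ "</li>".toList)

-- ===== PORT B =====
-- One pass over the characters: at each position emit the replacement for whichever of
-- "</code>", "<code>", "\n" starts here (advancing past it), else copy the character.
def scanChars : List Char → List Char
  | [] => []
  | c :: t =>
    if "</code>".toList.isPrefixOf (c :: t) then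
      "</inline_code>".toList ++ scanChars (List.drop 7 (c :: t))
    else if "<code>".toList.isPrefixOf (c :: t) then
      "<inline_code>".toList ++ scanChars (List.drop 6 (c :: t))
    else if c = '\n' then
      "<br>".toList ++ scanChars t
    else
      c :: scanChars t
termination_by l => l.length
decreasing_by
  · simp only [List.length_drop, List.length_cons]; omega
  · simp only [List.length_drop, List.length_cons]; omega
  · simp only [List.length_cons]; omega
  · simp only [List.length_cons]; omega

def list_item_alt (text : String) (checked : Option Bool) : String :=
  let body := String.ofList (scanChars text.toList)
  match checked with
  | none => "<li>" ++ body ++ "</li>"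
  | some b =>
    let flag := if b then " checked" else ""
    "<li class=\"task-list-item\"><input type=\"checkbox\" disabled" ++ flag ++ "> "
      ++ body ++ "</li>"

-- ===== PRECONDITION & SPEC =====
-- On inputs where some line contains '</code>' but no '<code>', A leaves that closing tag
-- unconverted (mismatched '</code>' in the output), while B converts it to '</inline_code>',
-- the intended rendering.
def D_list_item (text : String) (checked : Option Bool) : Prop :=
  ∃ l ∈ PySem.Chars.splitOn text.toList "\n".toList,
    PySem.Chars.isIn "</code>".toList l = true ∧ PySem.Chars.isIn "<code>".toList l = false
instance (text : String) (checked : Option Bool) : Decidable (D_list_item text checked) := by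
  unfold D_list_item; infer_instance

def Spec_list_item (text : String) (checked : Option Bool) (out : String) : Prop :=
  ¬ D_list_item text checked → out = list_item_alt text checked
instance (text : String) (checked : Option Bool) (out : String) : Decidable (Spec_list_item text checked out) := by
  unfold Spec_list_item; infer_instance

def pvDiffWitness_list_item : String × Option Bool := ("</code>", none)
def pvDiffWitnessOut_list_item : String × String := ("<li></code></li>", "<li></inline_code></li>")

-- ===== CLAIM (what is proved, stated in full; the proofs are below) =====
def Claim_unchanged_list_item : Prop := ∀ (text : String) (checked : Option Bool), Dom_list_item text checked → Spec_list_item text checked (list_item text checked)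
def Claim_changed_list_item : Prop := Dom_list_item (pvDiffWitness_list_item.1) (pvDiffWitness_list_item.2) ∧ D_list_item (pvDiffWitness_list_item.1) (pvDiffWitness_list_item.2) ∧ list_item (pvDiffWitness_list_item.1) (pvDiffWitness_list_item.2) = pvDiffWitnessOut_list_item.1 ∧ list_item_alt (pvDiffWitness_list_item.1) (pvDiffWitness_list_item.2) = pvDiffWitnessOut_list_item.2 ∧ pvDiffWitnessOut_list_item.1 ≠ pvDiffWitnessOut_list_item.2

def Claim_exact_list_item : Prop := ∀ (text : String) (checked : Option Bool), Dom_list_item text checked → D_list_item text checked → list_item text checked ≠ list_item_alt text checked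

-- ===== LEMMAS AND PROOFS =====

/- A simple accumulator-free model of Python's str.replace scan (left-to-right, no rescan). -/
def myRep (old new : List Char) : List Char → List Char
  | [] => []
  | c :: t =>
    if old.isPrefixOf (c :: t) = true ∧ old ≠ [] then
      new ++ myRep old new (List.drop old.length (c :: t))
    else c :: myRep old new t
termination_by l => l.length
decreasing_by
  · rename_i h
    simp only [List.length_drop]
    have : 1 ≤ old.length := by
      cases old with | nil => simp at h | cons a b => simp
    simp [List.length_cons]; omega
  · simp

theorem myRep_nil (old new : List Char) : myRep old new [] = [] := by rw [myRep]

theorem myRep_cons (old new : List Char) (c : Char) (t : List Char) :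
    myRep old new (c :: t) =
      if old.isPrefixOf (c :: t) = true ∧ old ≠ [] then
        new ++ myRep old new (List.drop old.length (c :: t))
      else c :: myRep old new t := by
  conv_lhs => rw [myRep]

theorem repGo (old new : List Char) (hold : old ≠ []) :
    ∀ fuel l acc, l.length ≤ fuel →
      PySem.Chars.replace.go old new fuel l acc = acc.reverse ++ myRep old new l := by
  intro fuel
  induction fuel with
  | zero =>
    intro l acc h
    have : l = [] := by cases l <;> simp_all
    subst this
    simp [PySem.Chars.replace.go, myRep]
  | succ n ih =>
    intro l acc h
    cases l with
    | nil => simp [PySem.Chars.replace.go, myRep]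
    | cons c t =>
      rw [PySem.Chars.replace.go]
      by_cases hp : old.isPrefixOf (c :: t) = true
      · rw [if_pos hp, ih _ _ (by
          have : 1 ≤ old.length := by cases old <;> simp_all
          simp only [List.length_drop, List.length_cons] at *; omega)]
        rw [myRep_cons, if_pos ⟨hp, hold⟩]
        simp
      · rw [if_neg (by simp [hp]), ih _ _ (by simp at h ⊢; omega)]
        rw [myRep_cons, if_neg (by simp [hp])]
        simp

theorem replace_eq_myRep (s old new : List Char) (hold : old ≠ []) :
    PySem.Chars.replace s old new = myRep old new s := by
  rw [PySem.Chars.replace]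
  rw [if_neg (by simp [hold])]
  simpa using repGo old new hold s.length s [] le_rfl

theorem myRep_not_infix (old new : List Char) (s : List Char) (h : ¬ old <:+: s) :
    myRep old new s = s := by
  induction s with
  | nil => rw [myRep_nil]
  | cons c t ih =>
    rw [myRep_cons, if_neg (by
      rintro ⟨hp, -⟩
      exact h ((List.isPrefixOf_iff_prefix.mp hp).isInfix))]
    rw [ih (fun hi => h (hi.trans (List.suffix_cons c t).isInfix))]

theorem prefix_append_cons {old xs ys : List Char} {c : Char}
    (h : old <+: xs ++ c :: ys) (hc : c ∉ old) : old <+: xs := by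
  have hlen : old.length ≤ xs.length := by
    by_contra hgt
    push Not at hgt
    have hle : old.length ≤ (xs ++ c :: ys).length := h.length_le
    have heq : old[xs.length]'(by omega) = (xs ++ c :: ys)[xs.length]'(by simp) :=
      List.IsPrefix.getElem h _
    have hval : (xs ++ c :: ys)[xs.length]'(by simp) = c := by simp
    exact hc (by rw [← hval, ← heq]; exact List.getElem_mem _)
  rw [List.prefix_iff_eq_take] at h ⊢
  rwa [List.take_append_of_le_length hlen] at h

theorem myRep_split (old new : List Char) (c : Char) (hc : c ∉ old) :
    ∀ xs ys, myRep old new (xs ++ c :: ys) = myRep old new xs ++ c :: myRep old new ys := by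
  intro xs
  induction hl : xs.length using Nat.strong_induction_on generalizing xs with
  | _ n ih =>
  subst hl
  intro ys
  cases xs with
  | nil =>
    rw [List.nil_append, myRep_cons, if_neg (by
      rintro ⟨hp, hne⟩
      have := List.isPrefixOf_iff_prefix.mp hp
      cases old with
      | nil => exact hne rfl
      | cons o t =>
        have : o = c := (List.cons_prefix_cons.mp this).1
        exact hc (by simp [this]))]
    rw [myRep_nil, List.nil_append]
  | cons a xs' =>
    by_cases hp : old.isPrefixOf (a :: xs' ++ c :: ys) = true ∧ old ≠ []
    · obtain ⟨hp1, hne⟩ := hp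
      have hpre : old <+: (a :: xs') ++ c :: ys := by
        simpa using List.isPrefixOf_iff_prefix.mp hp1
      have hpxs : old <+: a :: xs' := prefix_append_cons hpre hc
      have hlen : old.length ≤ (a :: xs').length := hpxs.length_le
      have h1 : 1 ≤ old.length := by cases old with | nil => exact absurd rfl hne | cons _ _ => simp
      rw [show ((a :: xs') ++ c :: ys) = a :: (xs' ++ c :: ys) by simp]
      rw [myRep_cons, if_pos ⟨by simpa using hp1, hne⟩]
      conv_rhs => rw [myRep_cons]
      rw [if_pos ⟨List.isPrefixOf_iff_prefix.mpr hpxs, hne⟩]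
      have hdrop : List.drop old.length (a :: (xs' ++ c :: ys))
          = List.drop old.length (a :: xs') ++ c :: ys := by
        rw [show a :: (xs' ++ c :: ys) = (a :: xs') ++ c :: ys by simp]
        exact List.drop_append_of_le_length hlen
      rw [hdrop, ih (List.drop old.length (a :: xs')).length (by simp; omega) _ rfl]
      simp
    · rw [show ((a :: xs') ++ c :: ys) = a :: (xs' ++ c :: ys) by simp]
      rw [myRep_cons, if_neg (by
        rintro ⟨hp1, hne⟩
        exact hp ⟨by simpa using hp1, hne⟩)]
      conv_rhs => rw [myRep_cons]
      rw [if_neg (by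
        rintro ⟨hp1, hne⟩
        have hpx : old <+: a :: xs' := List.isPrefixOf_iff_prefix.mp hp1
        exact hp ⟨List.isPrefixOf_iff_prefix.mpr (by simpa using hpx.trans (List.prefix_append _ _)), hne⟩)]
      rw [ih xs'.length (by simp) _ rfl]
      simp

theorem myRep_mem (old new : List Char) {c : Char} (hn : c ∉ new) :
    ∀ s, c ∉ s → c ∉ myRep old new s := by
  intro s
  induction hl : s.length using Nat.strong_induction_on generalizing s with
  | _ n ih =>
  subst hl
  cases s with
  | nil => intro _; rw [myRep_nil]; simp
  | cons a t =>
    intro hs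
    rw [myRep_cons]
    split_ifs with hcond
    · intro hmem
      rcases List.mem_append.mp hmem with h | h
      · exact hn h
      · have h1 : 1 ≤ old.length := by
          cases old with | nil => exact absurd rfl hcond.2 | cons _ _ => simp
        refine ih _ (by simp; omega) _ rfl (fun hd => hs (List.mem_of_mem_drop hd)) h
    · intro hmem
      rcases List.mem_cons.mp hmem with h | h
      · exact hs (by simp [h])
      · exact ih t.length (by simp) t rfl (fun ht => hs (by simp [ht])) h

theorem myRep_single_first (c : Char) (rep : List Char) (ys : List Char) :
    ∀ xs, c ∉ xs → myRep [c] rep (xs ++ c :: ys) = xs ++ rep ++ myRep [c] rep ys := by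
  intro xs
  induction xs with
  | nil =>
    intro _
    rw [List.nil_append, myRep_cons, if_pos ⟨by simp, by simp⟩]
    simp
  | cons a t ih =>
    intro h
    have ha : a ≠ c := fun hh => h (by simp [hh])
    rw [List.cons_append, myRep_cons, if_neg (by
      rintro ⟨hp, -⟩
      have := List.isPrefixOf_iff_prefix.mp hp
      exact ha ((List.cons_prefix_cons.mp this).1.symm))]
    rw [ih (fun hm => h (by simp [hm]))]
    simp

/- The split side: an accumulator-free model of str.split("\n"). -/
def mySplit : List Char → List (List Char)
  | [] => [[]]
  | c :: t => if c = '\n' then [] :: mySplit t else (mySplit t).modifyHead (c :: ·)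

theorem mySplit_ne_nil (s : List Char) : mySplit s ≠ [] := by
  induction s with
  | nil => simp [mySplit]
  | cons c t ih =>
    rw [mySplit]
    split_ifs
    · simp
    · obtain ⟨a, b, hab⟩ := List.exists_cons_of_ne_nil ih
      simp [hab]

theorem mySplit_cons (s : List Char) : ∃ a b, mySplit s = a :: b := by
  obtain ⟨a, b, hab⟩ := List.exists_cons_of_ne_nil (mySplit_ne_nil s)
  exact ⟨a, b, hab⟩

theorem splitGo (fuel : Nat) :
    ∀ l cur acc, l.length ≤ fuel →
      PySem.Chars.splitOn.go ['\n'] fuel l cur acc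
        = acc.reverse ++ (mySplit l).modifyHead (cur.reverse ++ ·) := by
  induction fuel with
  | zero =>
    intro l cur acc h
    have : l = [] := by cases l <;> simp_all
    subst this
    simp [PySem.Chars.splitOn.go, mySplit]
  | succ n ih =>
    intro l cur acc h
    cases l with
    | nil => simp [PySem.Chars.splitOn.go, mySplit]
    | cons c t =>
      rw [PySem.Chars.splitOn.go]
      by_cases hc : c = '\n'
      · rw [if_pos (by simp [hc]), ih _ _ _ (by simp at h ⊢; omega)]
        subst hc
        rw [mySplit, if_pos rfl]
        obtain ⟨a, b, hab⟩ := mySplit_cons t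
        simp [hab]
      · rw [if_neg (by simpa using Ne.symm hc), ih _ _ _ (by simp at h ⊢; omega)]
        rw [mySplit, if_neg hc]
        obtain ⟨a, b, hab⟩ := mySplit_cons t
        simp [hab]

theorem splitOn_eq_mySplit (s : List Char) :
    PySem.Chars.splitOn s ['\n'] = mySplit s := by
  rw [PySem.Chars.splitOn, splitGo (s.length + 1) s [] [] (by omega)]
  obtain ⟨a, b, hab⟩ := mySplit_cons s
  simp [hab]

theorem mySplit_no_newline (s : List Char) : ∀ l ∈ mySplit s, '\n' ∉ l := by
  induction s with
  | nil => simp [mySplit]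
  | cons c t ih =>
    rw [mySplit]
    split_ifs with hc
    · intro l hl
      rcases List.mem_cons.mp hl with h | h
      · subst h; simp
      · exact ih l h
    · obtain ⟨a, b, hab⟩ := mySplit_cons t
      rw [hab]
      intro l hl
      rcases List.mem_cons.mp hl with h | h
      · subst h
        have := ih a (by simp [hab])
        simp [this]
        exact fun hh => absurd hh.symm hc
      · exact ih l (by simp [hab, h])

theorem intercalate_mySplit (s : List Char) :
    List.intercalate ['\n'] (mySplit s) = s := by
  induction s with
  | nil => simp [mySplit, List.intercalate]
  | cons c t ih =>
    rw [mySplit]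
    obtain ⟨a, b, hab⟩ := mySplit_cons t
    split_ifs with hc
    · subst hc
      rw [hab] at ih ⊢
      simp [List.intercalate, List.intersperse] at ih ⊢
      cases b with
      | nil => simpa using ih
      | cons b0 b' => simpa using ih
    · rw [hab] at ih ⊢
      cases b with
      | nil =>
        simp [List.intercalate] at ih ⊢
        simp [ih]
      | cons b0 b' =>
        simp [List.intercalate, List.intersperse] at ih ⊢
        simp [ih]

theorem fline (l : List Char)
    (hcond : PySem.Chars.isIn "</code>".toList l = true → PySem.Chars.isIn "<code>".toList l = true) :
    (if PySem.Chars.isIn "<code>".toList l = true then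
        PySem.Chars.replace (PySem.Chars.replace l "<code>".toList "<inline_code>".toList)
          "</code>".toList "</inline_code>".toList
      else l)
    = myRep "</code>".toList "</inline_code>".toList (myRep "<code>".toList "<inline_code>".toList l) := by
  by_cases h : PySem.Chars.isIn "<code>".toList l = true
  · rw [if_pos h, replace_eq_myRep _ _ _ (by decide), replace_eq_myRep _ _ _ (by decide)]
  · rw [if_neg h]
    have ho : ¬ "<code>".toList <:+: l := by
      rw [← PySem.Chars.isIn_eq_false_iff]
      simpa using h
    have hcl : ¬ "</code>".toList <:+: l := by
      rw [← PySem.Chars.isIn_eq_false_iff]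
      cases hcc : PySem.Chars.isIn "</code>".toList l
      · rfl
      · exact absurd (hcond hcc) h
    rw [myRep_not_infix _ _ _ ho, myRep_not_infix _ _ _ hcl]

theorem g_no_nl (l : List Char) (h : '\n' ∉ l) :
    '\n' ∉ myRep "</code>".toList "</inline_code>".toList (myRep "<code>".toList "<inline_code>".toList l) :=
  myRep_mem _ _ (by decide) _ (myRep_mem _ _ (by decide) _ h)

theorem not_nl_infix (s : List Char) (h : '\n' ∉ s) : ¬ ['\n'] <:+: s :=
  fun hi => h (hi.subset (by simp))

theorem bodyEq : ∀ (lines : List (List Char)), lines ≠ [] →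
    (∀ l ∈ lines, '\n' ∉ l) →
    (∀ l ∈ lines, PySem.Chars.isIn "</code>".toList l = true → PySem.Chars.isIn "<code>".toList l = true) →
    PySem.Chars.join "<br>".toList (lines.map (fun line =>
        if PySem.Chars.isIn "<code>".toList line = true then
          PySem.Chars.replace (PySem.Chars.replace line "<code>".toList "<inline_code>".toList)
            "</code>".toList "</inline_code>".toList
        else line))
      = myRep ['\n'] "<br>".toList (myRep "</code>".toList "</inline_code>".toList
          (myRep "<code>".toList "<inline_code>".toList (List.intercalate ['\n'] lines))) := by
  intro lines
  induction lines with
  | nil => intro h; exact absurd rfl h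
  | cons a rest ih =>
    intro _ hnl hcond
    cases rest with
    | nil =>
      simp only [List.map_cons, List.map_nil]
      rw [show ∀ x : List Char, PySem.Chars.join "<br>".toList [x] = x from
        fun x => by simp [PySem.Chars.join, List.intercalate]]
      rw [show List.intercalate ['\n'] [a] = a by simp [List.intercalate]]
      rw [fline a (hcond a (by simp))]
      rw [myRep_not_infix _ _ _ (not_nl_infix _ (g_no_nl a (hnl a (by simp))))]
    | cons b r =>
      have hstep : List.intercalate ['\n'] (a :: b :: r)
          = a ++ '\n' :: List.intercalate ['\n'] (b :: r) := by
        simp [List.intercalate, List.intersperse]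
      rw [hstep]
      rw [myRep_split _ _ _ (by decide), myRep_split _ _ _ (by decide)]
      rw [myRep_single_first _ _ _ _ (g_no_nl a (hnl a (by simp)))]
      have hjoin : PySem.Chars.join "<br>".toList ((a :: b :: r).map (fun line =>
          if PySem.Chars.isIn "<code>".toList line = true then
            PySem.Chars.replace (PySem.Chars.replace line "<code>".toList "<inline_code>".toList)
              "</code>".toList "</inline_code>".toList
          else line))
          = (if PySem.Chars.isIn "<code>".toList a = true then
            PySem.Chars.replace (PySem.Chars.replace a "<code>".toList "<inline_code>".toList)
              "</code>".toList "</inline_code>".toList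
          else a) ++ "<br>".toList ++ PySem.Chars.join "<br>".toList ((b :: r).map (fun line =>
          if PySem.Chars.isIn "<code>".toList line = true then
            PySem.Chars.replace (PySem.Chars.replace line "<code>".toList "<inline_code>".toList)
              "</code>".toList "</inline_code>".toList
          else line)) := by
        simp [PySem.Chars.join, List.intercalate]
      rw [hjoin]
      rw [ih (by simp) (fun l hl => hnl l (List.mem_cons_of_mem _ hl))
        (fun l hl => hcond l (List.mem_cons_of_mem _ hl))]
      rw [fline a (hcond a (by simp))]

theorem bodyMain (text : String)
    (hcond : ∀ l ∈ PySem.Chars.splitOn text.toList "\n".toList,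
      PySem.Chars.isIn "</code>".toList l = true → PySem.Chars.isIn "<code>".toList l = true) :
    PySem.Chars.join "<br>".toList
      ((PySem.Chars.splitOn text.toList "\n".toList).foldl (fun parts line =>
        parts ++ [if PySem.Chars.isIn "<code>".toList line = true then
            PySem.Chars.replace (PySem.Chars.replace line "<code>".toList "<inline_code>".toList)
              "</code>".toList "</inline_code>".toList
          else line]) [])
    = myRep ['\n'] "<br>".toList (myRep "</code>".toList "</inline_code>".toList
        (myRep "<code>".toList "<inline_code>".toList text.toList)) := by
  have hnl : ("\n" : String).toList = ['\n'] := by decide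
  rw [hnl] at hcond ⊢
  rw [splitOn_eq_mySplit] at hcond ⊢
  rw [PySem.List.foldl_append_singleton_eq_map]
  rw [List.nil_append]
  rw [bodyEq (mySplit text.toList) (mySplit_ne_nil _) (mySplit_no_newline _) hcond]
  rw [intercalate_mySplit]

/- ===== the scanner equals the three chained replaces ===== -/

theorem scanChars_nil : scanChars [] = [] := by rw [scanChars]

theorem scanChars_cons (c : Char) (t : List Char) :
    scanChars (c :: t) =
      if "</code>".toList.isPrefixOf (c :: t) then
        "</inline_code>".toList ++ scanChars (List.drop 7 (c :: t))
      else if "<code>".toList.isPrefixOf (c :: t) then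
        "<inline_code>".toList ++ scanChars (List.drop 6 (c :: t))
      else if c = '\n' then
        "<br>".toList ++ scanChars t
      else
        c :: scanChars t := by
  conv_lhs => rw [scanChars]

theorem myRep_copy (old new : List Char) (c : Char) (t : List Char)
    (h : old.isPrefixOf (c :: t) = false) : myRep old new (c :: t) = c :: myRep old new t := by
  rw [myRep_cons, if_neg (by simp [h])]

-- the "<code>" pass copies a leading "</code>" unchanged
theorem pass1_close (r : List Char) :
    myRep "<code>".toList "<inline_code>".toList ("</code>".toList ++ r)
      = "</code>".toList ++ myRep "<code>".toList "<inline_code>".toList r := by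
  rw [show "</code>".toList = ['<','/','c','o','d','e','>'] from rfl]
  simp only [List.cons_append, List.nil_append]
  rw [myRep_copy _ _ _ _ (by simp [List.isPrefixOf]),
      myRep_copy _ _ _ _ (by simp [List.isPrefixOf]),
      myRep_copy _ _ _ _ (by simp [List.isPrefixOf]),
      myRep_copy _ _ _ _ (by simp [List.isPrefixOf]),
      myRep_copy _ _ _ _ (by simp [List.isPrefixOf]),
      myRep_copy _ _ _ _ (by simp [List.isPrefixOf]),
      myRep_copy _ _ _ _ (by simp [List.isPrefixOf])]

-- the "</code>" pass copies an inserted "<inline_code>" unchanged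
theorem pass2_skip (X : List Char) :
    myRep "</code>".toList "</inline_code>".toList ("<inline_code>".toList ++ X)
      = "<inline_code>".toList ++ myRep "</code>".toList "</inline_code>".toList X := by
  rw [show "<inline_code>".toList = ['<','i','n','l','i','n','e','_','c','o','d','e','>'] from rfl]
  simp only [List.cons_append, List.nil_append]
  rw [myRep_copy _ _ _ _ (by simp [List.isPrefixOf]),
      myRep_copy _ _ _ _ (by simp [List.isPrefixOf]),
      myRep_copy _ _ _ _ (by simp [List.isPrefixOf]),
      myRep_copy _ _ _ _ (by simp [List.isPrefixOf]),
      myRep_copy _ _ _ _ (by simp [List.isPrefixOf]),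
      myRep_copy _ _ _ _ (by simp [List.isPrefixOf]),
      myRep_copy _ _ _ _ (by simp [List.isPrefixOf]),
      myRep_copy _ _ _ _ (by simp [List.isPrefixOf]),
      myRep_copy _ _ _ _ (by simp [List.isPrefixOf]),
      myRep_copy _ _ _ _ (by simp [List.isPrefixOf]),
      myRep_copy _ _ _ _ (by simp [List.isPrefixOf]),
      myRep_copy _ _ _ _ (by simp [List.isPrefixOf]),
      myRep_copy _ _ _ _ (by simp [List.isPrefixOf])]

-- the "\n" pass copies a newline-free block unchanged
theorem pass3_skip (new : List Char) : ∀ (p : List Char), '\n' ∉ p → ∀ X,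
    myRep ['\n'] new (p ++ X) = p ++ myRep ['\n'] new X := by
  intro p
  induction p with
  | nil => intro _ X; simp
  | cons a t ih =>
    intro h X
    have ha : a ≠ '\n' := fun hh => h (by simp [hh])
    rw [List.cons_append, myRep_copy _ _ _ _ (by
      simp [List.isPrefixOf]
      exact fun hh => absurd hh.symm ha)]
    rw [ih (fun hm => h (by simp [hm])) X]
    simp

-- the replace scan consumes a leading occurrence of the pattern
theorem myRep_hit (old new : List Char) (hne : old ≠ []) (X : List Char) :
    myRep old new (old ++ X) = new ++ myRep old new X := by
  cases old with
  | nil => exact absurd rfl hne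
  | cons o ot =>
    rw [List.cons_append, myRep_cons, if_pos ⟨List.isPrefixOf_iff_prefix.mpr
      (by rw [← List.cons_append]; exact List.prefix_append _ _), hne⟩]
    rw [← List.cons_append, List.drop_left]

-- a '<'-free prefix of the "<code>"-pass output was already a prefix of the input
theorem prefix_reflect_code :
    ∀ (t u : List Char), '<' ∉ u →
      u <+: myRep "<code>".toList "<inline_code>".toList t → u <+: t := by
  intro t
  induction hl : t.length using Nat.strong_induction_on generalizing t with
  | _ n ih =>
  subst hl
  cases t with
  | nil =>
    rw [myRep_nil]
    exact fun _ _ h => h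
  | cons c t' =>
    intro u hu h
    rw [myRep_cons] at h
    split_ifs at h with hcond
    · cases u with
      | nil => simp
      | cons x u' =>
        rw [show "<inline_code>".toList = ['<','i','n','l','i','n','e','_','c','o','d','e','>'] from rfl] at h
        simp only [List.cons_append] at h
        have := (List.cons_prefix_cons.mp h).1
        exact absurd (by simp [this]) hu
    · cases u with
      | nil => simp
      | cons x u' =>
        obtain ⟨hx, hu'⟩ := List.cons_prefix_cons.mp h
        subst hx
        exact List.cons_prefix_cons.mpr ⟨rfl, ih t'.length (by simp) t' rfl u'
          (fun hm => hu (by simp [hm])) hu'⟩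

theorem scan_eq : ∀ (s : List Char),
    scanChars s = myRep ['\n'] "<br>".toList (myRep "</code>".toList "</inline_code>".toList
      (myRep "<code>".toList "<inline_code>".toList s)) := by
  intro s
  induction hl : s.length using Nat.strong_induction_on generalizing s with
  | _ n ih =>
  subst hl
  cases s with
  | nil => rw [scanChars_nil, myRep_nil, myRep_nil, myRep_nil]
  | cons c t =>
    rw [scanChars_cons]
    by_cases h1 : "</code>".toList.isPrefixOf (c :: t) = true
    · rw [if_pos h1]
      obtain ⟨r, hr⟩ := (List.isPrefixOf_iff_prefix.mp h1)
      have hdrop : List.drop 7 (c :: t) = r := by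
        rw [← hr]
        exact List.drop_left' (by decide)
      rw [hdrop, ← hr, pass1_close]
      rw [myRep_hit _ _ (by decide)]
      rw [pass3_skip _ "</inline_code>".toList (by decide)]
      rw [ih r.length (by
        simp only [List.length_cons]
        have hlen : r.length = t.length + 1 - 7 := by
          rw [← hdrop]; simp
        omega) r rfl]
    · rw [if_neg h1]
      by_cases h2 : "<code>".toList.isPrefixOf (c :: t) = true
      · rw [if_pos h2]
        obtain ⟨r, hr⟩ := (List.isPrefixOf_iff_prefix.mp h2)
        have hdrop : List.drop 6 (c :: t) = r := by
          rw [← hr]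
          exact List.drop_left' (by decide)
        rw [hdrop, ← hr]
        rw [myRep_hit _ _ (by decide)]
        rw [pass2_skip]
        rw [pass3_skip _ "<inline_code>".toList (by decide)]
        rw [ih r.length (by
          simp only [List.length_cons]
          have hlen : r.length = t.length + 1 - 6 := by
            rw [← hdrop]; simp
          omega) r rfl]
      · rw [if_neg h2]
        have hcopy1 : myRep "<code>".toList "<inline_code>".toList (c :: t)
            = c :: myRep "<code>".toList "<inline_code>".toList t :=
          myRep_copy _ _ _ _ (Bool.eq_false_iff.mpr h2)
        have hcopy2 : myRep "</code>".toList "</inline_code>".toList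
            (c :: myRep "<code>".toList "<inline_code>".toList t)
            = c :: myRep "</code>".toList "</inline_code>".toList
                (myRep "<code>".toList "<inline_code>".toList t) := by
          apply myRep_copy
          cases hp : ("</code>".toList).isPrefixOf (c :: myRep "<code>".toList "<inline_code>".toList t)
          · rfl
          · exfalso
            have hpre := List.isPrefixOf_iff_prefix.mp hp
            rw [show "</code>".toList = '<' :: "/code>".toList from rfl] at hpre
            obtain ⟨hc, htail⟩ := List.cons_prefix_cons.mp hpre
            have hrefl : "/code>".toList <+: t :=
              prefix_reflect_code t _ (by decide) htail
            have : "</code>".toList <+: c :: t := by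
              rw [show "</code>".toList = '<' :: "/code>".toList from rfl]
              exact List.cons_prefix_cons.mpr ⟨hc, hrefl⟩
            exact absurd (List.isPrefixOf_iff_prefix.mpr this) h1
        rw [hcopy1, hcopy2]
        by_cases h3 : c = '\n'
        · rw [if_pos h3, h3]
          rw [show ('\n' :: myRep "</code>".toList "</inline_code>".toList
              (myRep "<code>".toList "<inline_code>".toList t))
            = ['\n'] ++ myRep "</code>".toList "</inline_code>".toList
              (myRep "<code>".toList "<inline_code>".toList t) from rfl]
          rw [myRep_hit _ _ (by simp)]
          rw [ih t.length (by simp) t rfl]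
        · rw [if_neg h3]
          rw [myRep_copy _ _ _ _ (by
            simp [List.isPrefixOf]
            exact fun hh => absurd hh.symm h3)]
          rw [ih t.length (by simp) t rfl]

/- Length facts used for the tightness theorem. -/
theorem myRep_length_ge (old new : List Char) (hlen : old.length ≤ new.length) :
    ∀ s : List Char, s.length ≤ (myRep old new s).length := by
  intro s
  induction hl : s.length using Nat.strong_induction_on generalizing s with
  | _ n ih =>
  subst hl
  cases s with
  | nil => rw [myRep_nil]
  | cons a t =>
    rw [myRep_cons]
    split_ifs with hcond
    · have hpre : old <+: a :: t := List.isPrefixOf_iff_prefix.mp hcond.1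
      have h1 : 1 ≤ old.length := by
        cases old with | nil => exact absurd rfl hcond.2 | cons _ _ => simp
      have hple : old.length ≤ (a :: t).length := hpre.length_le
      have hrec := ih (List.drop old.length (a :: t)).length (by simp; omega) _ rfl
      simp only [List.length_append, List.length_drop] at hrec ⊢
      omega
    · have hrec := ih t.length (by simp) t rfl
      simp only [List.length_cons]
      omega

theorem myRep_length_gt (old new : List Char) (hlen : old.length < new.length) (hne : old ≠ []) :
    ∀ s : List Char, old <:+: s → s.length < (myRep old new s).length := by
  intro s
  induction hl : s.length using Nat.strong_induction_on generalizing s with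
  | _ n ih =>
  subst hl
  cases s with
  | nil =>
    intro hi
    exact absurd (List.eq_nil_of_infix_nil hi) hne
  | cons a t =>
    intro hi
    rw [myRep_cons]
    split_ifs with hcond
    · have hpre : old <+: a :: t := List.isPrefixOf_iff_prefix.mp hcond.1
      have h1 : 1 ≤ old.length := by
        cases old with | nil => exact absurd rfl hne | cons _ _ => simp
      have hple : old.length ≤ (a :: t).length := hpre.length_le
      have hrec := myRep_length_ge old new (by omega) (List.drop old.length (a :: t))
      simp only [List.length_append, List.length_drop] at hrec ⊢
      omega
    · have hpre : ¬ old <+: a :: t := by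
        intro hp
        exact hcond ⟨List.isPrefixOf_iff_prefix.mpr hp, hne⟩
      have hit : old <:+: t := by
        rcases (List.infix_cons_iff.mp hi) with h | h
        · exact absurd h hpre
        · exact h
      have hrec := ih t.length (by simp) t rfl hit
      simp only [List.length_cons]
      omega

/- B's body equals the per-line map of the unconditional double replace. -/
theorem myRep_intercalate (old new : List Char) (hc : '\n' ∉ old) :
    ∀ L : List (List Char), myRep old new (List.intercalate ['\n'] L)
      = List.intercalate ['\n'] (L.map (myRep old new)) := by
  intro L
  induction L with
  | nil => simp [List.intercalate, myRep_nil]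
  | cons a rest ih =>
    cases rest with
    | nil => simp [List.intercalate]
    | cons b r =>
      rw [show List.intercalate ['\n'] (a :: b :: r) = a ++ '\n' :: List.intercalate ['\n'] (b :: r) by
        simp [List.intercalate, List.intersperse]]
      rw [myRep_split _ _ _ hc, ih]
      simp [List.intercalate, List.intersperse]

theorem myRep_nl_intercalate (br : List Char) :
    ∀ L : List (List Char), (∀ l ∈ L, '\n' ∉ l) →
      myRep ['\n'] br (List.intercalate ['\n'] L) = List.intercalate br L := by
  intro L
  induction L with
  | nil => intro _; simp [List.intercalate, myRep_nil]
  | cons a rest ih =>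
    intro hnl
    cases rest with
    | nil =>
      rw [show List.intercalate ['\n'] [a] = a by simp [List.intercalate],
        show List.intercalate br [a] = a by simp [List.intercalate]]
      exact myRep_not_infix _ _ _ (not_nl_infix _ (hnl a (by simp)))
    | cons b r =>
      rw [show List.intercalate ['\n'] (a :: b :: r) = a ++ '\n' :: List.intercalate ['\n'] (b :: r) by
        simp [List.intercalate, List.intersperse]]
      rw [myRep_single_first _ _ _ _ (hnl a (by simp))]
      rw [ih (fun l hl => hnl l (List.mem_cons_of_mem _ hl))]
      rw [show List.intercalate br (a :: b :: r) = a ++ br ++ List.intercalate br (b :: r) by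
        simp [List.intercalate, List.intersperse]]

theorem interLen_le (br : List Char) (f g : List Char → List Char) :
    ∀ L : List (List Char), (∀ l ∈ L, (f l).length ≤ (g l).length) →
      (List.intercalate br (L.map f)).length ≤ (List.intercalate br (L.map g)).length := by
  intro L
  induction L with
  | nil => intro _; simp
  | cons a rest ih =>
    intro hle
    cases rest with
    | nil =>
      simp only [List.map_cons, List.map_nil]
      simp only [show ∀ x : List Char, List.intercalate br [x] = x from fun x => by simp [List.intercalate]]
      exact hle a (by simp)
    | cons b r =>
      rw [show ((a :: b :: r).map f) = f a :: (b :: r).map f by simp,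
        show ((a :: b :: r).map g) = g a :: (b :: r).map g by simp]
      simp only [show ∀ x : List Char, List.intercalate br (x :: (b :: r).map f) = x ++ br ++ List.intercalate br ((b :: r).map f) from
        fun x => by simp [List.intercalate, List.intersperse],
        show ∀ x : List Char, List.intercalate br (x :: (b :: r).map g) = x ++ br ++ List.intercalate br ((b :: r).map g) from
        fun x => by simp [List.intercalate, List.intersperse]]
      simp only [List.length_append]
      have := ih (fun l hl => hle l (List.mem_cons_of_mem _ hl))
      have hfa := hle a (by simp)
      omega

theorem interLen_lt (br : List Char) (f g : List Char → List Char) :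
    ∀ L : List (List Char), (∀ l ∈ L, (f l).length ≤ (g l).length) →
      (∃ l ∈ L, (f l).length < (g l).length) →
      (List.intercalate br (L.map f)).length < (List.intercalate br (L.map g)).length := by
  intro L
  induction L with
  | nil => rintro _ ⟨l, hl, -⟩; simp at hl
  | cons a rest ih =>
    intro hle hex
    cases rest with
    | nil =>
      simp only [List.map_cons, List.map_nil]
      simp only [show ∀ x : List Char, List.intercalate br [x] = x from fun x => by simp [List.intercalate]]
      rcases hex with ⟨l, hl, hlt⟩
      rcases List.mem_singleton.mp hl with rfl
      exact hlt
    | cons b r =>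
      rw [show ((a :: b :: r).map f) = f a :: (b :: r).map f by simp,
        show ((a :: b :: r).map g) = g a :: (b :: r).map g by simp]
      simp only [show ∀ x : List Char, List.intercalate br (x :: (b :: r).map f) = x ++ br ++ List.intercalate br ((b :: r).map f) from
        fun x => by simp [List.intercalate, List.intersperse],
        show ∀ x : List Char, List.intercalate br (x :: (b :: r).map g) = x ++ br ++ List.intercalate br ((b :: r).map g) from
        fun x => by simp [List.intercalate, List.intersperse]]
      simp only [List.length_append]
      rcases hex with ⟨l, hl, hlt⟩
      rcases List.mem_cons.mp hl with rfl | hl'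
      · have hrest := interLen_le br f g (b :: r) (fun l hl => hle l (List.mem_cons_of_mem _ hl))
        omega
      · have := ih (fun l hl => hle l (List.mem_cons_of_mem _ hl)) ⟨l, hl', hlt⟩
        have hfa := hle a (by simp)
        omega

theorem bodyLen (text : String)
    (hD : ∃ l ∈ PySem.Chars.splitOn text.toList "\n".toList,
      PySem.Chars.isIn "</code>".toList l = true ∧ PySem.Chars.isIn "<code>".toList l = false) :
    (PySem.Chars.join "<br>".toList
      ((PySem.Chars.splitOn text.toList "\n".toList).foldl (fun parts line =>
        parts ++ [if PySem.Chars.isIn "<code>".toList line = true then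
            PySem.Chars.replace (PySem.Chars.replace line "<code>".toList "<inline_code>".toList)
              "</code>".toList "</inline_code>".toList
          else line]) [])).length
    < (myRep ['\n'] "<br>".toList (myRep "</code>".toList "</inline_code>".toList
        (myRep "<code>".toList "<inline_code>".toList text.toList))).length := by
  have hnl : ("\n" : String).toList = ['\n'] := by decide
  rw [hnl] at hD ⊢
  rw [splitOn_eq_mySplit] at hD ⊢
  rw [PySem.List.foldl_append_singleton_eq_map, List.nil_append]
  have hRHS : myRep ['\n'] "<br>".toList (myRep "</code>".toList "</inline_code>".toList
      (myRep "<code>".toList "<inline_code>".toList text.toList))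
      = List.intercalate "<br>".toList ((mySplit text.toList).map
          (fun l => myRep "</code>".toList "</inline_code>".toList
            (myRep "<code>".toList "<inline_code>".toList l))) := by
    conv_lhs => rw [← intercalate_mySplit text.toList]
    rw [myRep_intercalate _ _ (by decide), myRep_intercalate _ _ (by decide), List.map_map]
    rw [myRep_nl_intercalate _ _ (by
      intro l hl
      rcases List.mem_map.mp hl with ⟨l0, hl0, rfl⟩
      exact g_no_nl l0 (mySplit_no_newline _ l0 hl0))]
    rfl
  rw [hRHS]
  rw [show ∀ X, PySem.Chars.join "<br>".toList X = List.intercalate "<br>".toList X from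
    fun X => rfl]
  apply interLen_lt
  · intro l _
    by_cases ho : PySem.Chars.isIn "<code>".toList l = true
    · rw [if_pos ho, replace_eq_myRep _ _ _ (by decide), replace_eq_myRep _ _ _ (by decide)]
    · rw [if_neg ho]
      have hid : myRep "<code>".toList "<inline_code>".toList l = l :=
        myRep_not_infix _ _ _ (by
          rw [← PySem.Chars.isIn_eq_false_iff]
          simpa using ho)
      rw [hid]
      exact myRep_length_ge _ _ (by decide) l
  · rcases hD with ⟨l0, hl0, hc, ho⟩
    refine ⟨l0, hl0, ?_⟩
    rw [if_neg (by rw [ho]; simp)]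
    have hid : myRep "<code>".toList "<inline_code>".toList l0 = l0 :=
      myRep_not_infix _ _ _ (by
        rw [← PySem.Chars.isIn_eq_false_iff]
        exact ho)
    rw [hid]
    exact myRep_length_gt _ _ (by decide) (by decide) l0 ((PySem.Chars.isIn_iff_infix _ _).mp hc)

-- ===== VERDICT (by name: the statement is the Claim_ definition above) =====
theorem list_item_spec : Claim_unchanged_list_item := by
  intro text checked _ hnd
  have hcond : ∀ l ∈ PySem.Chars.splitOn text.toList "\n".toList,
      PySem.Chars.isIn "</code>".toList l = true → PySem.Chars.isIn "<code>".toList l = true := by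
    intro l hl hc
    cases ho : PySem.Chars.isIn "<code>".toList l
    · exact absurd ⟨l, hl, hc, ho⟩ hnd
    · rfl
  have hbody := (bodyMain text hcond).trans (scan_eq text.toList).symm
  apply String.toList_inj.mp
  cases checked with
  | none =>
    simp only [list_item, list_item_alt, String.toList_append, String.toList_ofList]
    rw [hbody]
  | some b =>
    simp only [list_item, list_item_alt, String.toList_append, String.toList_ofList]
    rw [hbody]
    cases b <;> simp

theorem scanChars_witness : scanChars ("</code>" : String).toList = "</inline_code>".toList := by
  rw [show ("</code>" : String).toList = '<' :: "/code>".toList from rfl]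
  rw [scanChars_cons, if_pos (by decide)]
  rw [show List.drop 7 ('<' :: "/code>".toList) = [] from rfl, scanChars_nil]
  decide

theorem list_item_changed : Claim_changed_list_item := by
  unfold Claim_changed_list_item
  refine ⟨by decide, by decide, by decide, ?_, by decide⟩
  apply String.toList_inj.mp
  simp only [pvDiffWitness_list_item, pvDiffWitnessOut_list_item, list_item_alt,
    String.toList_append, String.toList_ofList]
  rw [scanChars_witness]
  decide

theorem list_item_tight : Claim_exact_list_item := by
  intro text checked _ hD heq
  have hlt := bodyLen text hD
  rw [← scan_eq] at hlt
  have h2 := congrArg String.toList heq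
  cases checked with
  | none =>
    simp only [list_item, list_item_alt, String.toList_append, String.toList_ofList] at h2
    have h3 := congrArg List.length h2
    simp only [List.length_append] at h3
    omega
  | some b =>
    cases b <;>
    · simp only [list_item, list_item_alt, String.toList_append, String.toList_ofList,
        Bool.false_eq_true, if_true, if_false] at h2
      rw [show ("<li class=\"task-list-item\"><input type=\"checkbox\" disabled" : String)
          = "<li class=\"task-list-item\">" ++ "<input type=\"checkbox\" disabled" from by decide,
        show ("> " : String) = ">" ++ " " from by decide] at h2
      simp only [String.toList_append] at h2
      have h3 := congrArg List.length h2
      simp only [List.length_append, List.length_nil] at h3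
      omega
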